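-- pv_equiv track=rewrite | github.com/Nish223/Smart-Recipe-Recommendation | utils.py | get_meal_type
-- ===== SOURCE A (Python) =====
-- def get_meal_type(ingredients):
--     nonveg_keywords = ['chicken', 'beef', 'fish', 'mutton', 'shrimp', 'egg', 'lamb', 'pork']
--     vegan_exclude = ['milk', 'cheese', 'egg', 'yogurt', 'butter', 'paneer', 'honey']
--     if any(any(nv in ing for nv in nonveg_keywords) for ing in ingredients):
--         return 'Non-Veg'
--     if any(any(vx in ing for vx in vegan_exclude) for ing in ingredients):
--         return 'Vegetarian'
--     return 'Vegan'
-- ===== SOURCE B (Python) =====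
-- def get_meal_type(ingredients):
--     # One combined haystack (NUL-joined, NUL never occurs in the textual input)
--     # searched once per keyword; each keyword carries a severity and the
--     # label is just the maximum severity found ('egg' is non-veg, rank 2).
--     severity = {'chicken': 2, 'beef': 2, 'fish': 2, 'mutton': 2, 'shrimp': 2,
--                 'egg': 2, 'lamb': 2, 'pork': 2,
--                 'milk': 1, 'cheese': 1, 'yogurt': 1, 'butter': 1,
--                 'paneer': 1, 'honey': 1}
--     blob = '\x00'.join(ingredients)
--     level = 0
--     for kw, s in severity.items():
--         if kw in blob and s > level:
--             level = s
--     return ('Vegan', 'Vegetarian', 'Non-Veg')[level]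
-- ===== Notes on version B (the rewrite author's own statement) =====
-- stated objective: alternative
-- what changed: Instead of A's two ingredient-major any-of-any scans, B joins all ingredients into one NUL-separated haystack, searches it once per keyword using a keyword-to-severity table (egg ranked non-veg), and picks the label by the maximum severity found.
import Mathlib
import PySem

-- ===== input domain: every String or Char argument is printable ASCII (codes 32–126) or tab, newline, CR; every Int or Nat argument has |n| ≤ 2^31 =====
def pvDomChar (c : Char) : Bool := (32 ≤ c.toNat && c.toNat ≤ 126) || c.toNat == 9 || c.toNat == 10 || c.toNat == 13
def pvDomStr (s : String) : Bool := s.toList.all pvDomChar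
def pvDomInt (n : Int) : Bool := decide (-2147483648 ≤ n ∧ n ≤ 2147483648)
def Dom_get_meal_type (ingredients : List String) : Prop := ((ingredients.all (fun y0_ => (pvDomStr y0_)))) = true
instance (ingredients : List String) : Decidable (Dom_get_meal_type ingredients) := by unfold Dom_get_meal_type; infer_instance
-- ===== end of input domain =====

-- B replaces A's per-ingredient double any-scan by one NUL-joined haystack searched once per
-- keyword, with a keyword→severity table and a label lookup by maximal severity (alternative
-- algorithm, same asymptotic cost).

-- ===== PORT A =====
def pvNonveg : List String := ["chicken", "beef", "fish", "mutton", "shrimp", "egg", "lamb", "pork"]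
def pvVeganExclude : List String := ["milk", "cheese", "egg", "yogurt", "butter", "paneer", "honey"]

def get_meal_type (ingredients : List String) : String :=
  if ingredients.any (fun ing => pvNonveg.any (fun nv => PySem.Str.isIn nv ing)) then "Non-Veg"
  else if ingredients.any (fun ing => pvVeganExclude.any (fun vx => PySem.Str.isIn vx ing)) then "Vegetarian"
  else "Vegan"

-- ===== PORT B =====
-- Source B's severity dict, iterated with .items(): an association list in insertion order.
def pvSeverity : List (String × Int) :=
  [("chicken", 2), ("beef", 2), ("fish", 2), ("mutton", 2), ("shrimp", 2),
   ("egg", 2), ("lamb", 2), ("pork", 2),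
   ("milk", 1), ("cheese", 1), ("yogurt", 1), ("butter", 1), ("paneer", 1), ("honey", 1)]

def get_meal_type_alt (ingredients : List String) : String :=
  let blob := PySem.Str.join "\x00" ingredients
  let level : Int := pvSeverity.foldl
    (fun lv p => if PySem.Str.isIn p.1 blob && decide (lv < p.2) then p.2 else lv) 0
  -- tuple index ('Vegan','Vegetarian','Non-Veg')[level]; level is provably 0, 1 or 2, so the
  -- .getD "" default is unreachable (Python never raises here)
  (PySem.List.pyGet? ["Vegan", "Vegetarian", "Non-Veg"] level).getD ""

-- ===== PRECONDITION & SPEC =====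
def Spec_get_meal_type (ingredients : List String) (out : String) : Prop := out = get_meal_type_alt ingredients
instance (ingredients : List String) (out : String) : Decidable (Spec_get_meal_type ingredients out) := by unfold Spec_get_meal_type; infer_instance

-- ===== CLAIM (what is proved, stated in full; the proofs are below) =====
def Claim_equal_get_meal_type : Prop := ∀ (ingredients : List String), Dom_get_meal_type ingredients → Spec_get_meal_type ingredients (get_meal_type ingredients)

-- ===== LEMMAS AND PROOFS =====

-- an infix that avoids the separator character lies entirely left or right of it
theorem pv_infix_split {kw x rest : List Char} {c : Char} (hc : c ∉ kw) :
    kw <:+: x ++ c :: rest ↔ kw <:+: x ∨ kw <:+: rest := by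
  constructor
  · rintro ⟨s, t, h⟩
    have h' : s ++ (kw ++ t) = x ++ c :: rest := by rw [← List.append_assoc]; exact h
    by_cases hA : s.length + kw.length ≤ x.length
    · left
      have hx : x = (s ++ (kw ++ t)).take x.length := by
        rw [h']; rw [List.take_append]; simp
      rw [List.take_append, List.take_of_length_le (by omega),
          List.take_append, List.take_of_length_le (by omega)] at hx
      exact ⟨s, (t.take (x.length - s.length - kw.length)), by rw [hx]; simp⟩
    · by_cases hB : x.length + 1 ≤ s.length
      · right
        have hr : rest = (s ++ (kw ++ t)).drop (x.length + 1) := by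
          rw [h', List.drop_append, List.drop_of_length_le (by omega)]
          have : x.length + 1 - x.length = 1 := by omega
          rw [this]; simp
        rw [List.drop_append] at hr
        have h0 : x.length + 1 - s.length = 0 := by omega
        rw [h0, List.drop_zero] at hr
        exact ⟨s.drop (x.length + 1), t, by rw [hr, ← List.append_assoc]⟩
      · exfalso
        have hlt : x.length < (x ++ c :: rest).length := by simp
        have h1 : (x ++ c :: rest)[x.length] = c := by
          rw [List.getElem_append_right (le_refl _)]; simp
        have h2 : (s ++ (kw ++ t))[x.length]'(by rw [h']; exact hlt) = kw[x.length - s.length]'(by omega) := by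
          rw [List.getElem_append_right (by omega)]
          rw [List.getElem_append_left (by omega)]
        have h3 : (x ++ c :: rest)[x.length]'hlt = kw[x.length - s.length]'(by omega) := by
          rw [← h2]; congr 1; exact h'.symm
        rw [h1] at h3
        exact hc (h3 ▸ List.getElem_mem _)
  · rintro (⟨s, t, h⟩ | ⟨s, t, h⟩)
    · exact ⟨s, t ++ c :: rest, by rw [← h]; simp⟩
    · exact ⟨x ++ c :: s, t, by rw [← h]; simp⟩

-- a nonempty separator-free word is an infix of the intercalation iff it is an infix of a piece
theorem pv_infix_intercalate {kw : List Char} {c : Char} (hc : c ∉ kw) (hne : kw ≠ []) :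
    ∀ xss : List (List Char), (kw <:+: List.intercalate [c] xss ↔ ∃ x ∈ xss, kw <:+: x)
  | [] => by simp [List.intercalate, hne]
  | [x] => by simp [List.intercalate]
  | x :: y :: xs => by
      have hj : List.intercalate [c] (x :: y :: xs) = x ++ c :: List.intercalate [c] (y :: xs) := by
        simp [List.intercalate, List.intersperse]
      rw [hj, pv_infix_split hc, pv_infix_intercalate hc hne (y :: xs)]
      simp only [List.mem_cons]
      constructor
      · rintro (h | ⟨z, hz, h⟩)
        · exact ⟨x, Or.inl rfl, h⟩
        · exact ⟨z, Or.inr hz, h⟩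
      · rintro ⟨z, (rfl | hz), h⟩
        · exact Or.inl h
        · exact Or.inr ⟨z, hz, h⟩

-- searching a NUL-free keyword in the NUL-joined haystack = searching each ingredient
theorem pv_isIn_join (kw : String) (hc : (Char.ofNat 0) ∉ kw.toList) (hne : kw.toList ≠ [])
    (ingredients : List String) :
    PySem.Str.isIn kw (PySem.Str.join "\x00" ingredients)
      = ingredients.any (fun ing => PySem.Str.isIn kw ing) := by
  rw [Bool.eq_iff_iff]
  have hsep : ("\x00" : String).toList = [Char.ofNat 0] := rfl
  simp only [PySem.Str.isIn_eq, PySem.Str.toList_join, hsep, PySem.Chars.join,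
    PySem.Chars.isIn_iff_infix, pv_infix_intercalate hc hne, List.any_eq_true,
    List.mem_map]
  constructor
  · rintro ⟨x, ⟨ing, hing, rfl⟩, h⟩; exact ⟨ing, hing, h⟩
  · rintro ⟨ing, hing, h⟩; exact ⟨ing.toList, ⟨ing, hing, rfl⟩, h⟩

-- the running-maximum loop over a {1,2}-valued table, characterised
theorem pv_fold_level (g : String → Bool) :
    ∀ (l : List (String × Int)) (m : Int),
    (∀ p ∈ l, p.2 = 1 ∨ p.2 = 2) → (m = 0 ∨ m = 1 ∨ m = 2) →
    l.foldl (fun lv p => if g p.1 && decide (lv < p.2) then p.2 else lv) m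
      = if l.any (fun p => g p.1 && p.2 == 2) || m == 2 then 2
        else if l.any (fun p => g p.1 && p.2 == 1) || m == 1 then 1
        else 0
  | [], m => by
      intro _ hm
      rcases hm with rfl | rfl | rfl <;> simp
  | p :: l, m => by
      intro hp hm
      have hp2 := hp p (List.mem_cons_self ..)
      rw [List.foldl_cons,
        pv_fold_level g l _ (fun q hq => hp q (List.mem_cons_of_mem _ hq))
          (by rcases hp2 with h | h <;> rcases hm with rfl | rfl | rfl <;> split_ifs <;> omega)]
      rcases hp2 with h | h <;> rcases hm with rfl | rfl | rfl <;>
        cases hg : g p.1 <;>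
        simp [List.any_cons, hg, h] <;> split_ifs <;> simp_all <;>
        · rename_i hex
          obtain ⟨a, ha, hga⟩ := hex
          exact absurd hga (by simp [*])

theorem pv_level_char (blob : String) :
    pvSeverity.foldl
      (fun lv p => if PySem.Str.isIn p.1 blob && decide (lv < p.2) then p.2 else lv) 0
    = if (PySem.Str.isIn "chicken" blob || (PySem.Str.isIn "beef" blob || (PySem.Str.isIn "fish" blob
          || (PySem.Str.isIn "mutton" blob || (PySem.Str.isIn "shrimp" blob || (PySem.Str.isIn "egg" blob
          || (PySem.Str.isIn "lamb" blob || PySem.Str.isIn "pork" blob))))))) then 2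
      else if (PySem.Str.isIn "milk" blob || (PySem.Str.isIn "cheese" blob || (PySem.Str.isIn "yogurt" blob
          || (PySem.Str.isIn "butter" blob || (PySem.Str.isIn "paneer" blob || PySem.Str.isIn "honey" blob))))) then 1
      else 0 := by
  rw [pv_fold_level (fun kw => PySem.Str.isIn kw blob) pvSeverity 0 (by decide) (by omega)]
  simp [pvSeverity]

-- swap the two any-scans (ingredient-major to keyword-major)
theorem pv_any_swap (xs ks : List String) :
    xs.any (fun x => ks.any (fun k => PySem.Str.isIn k x))
      = ks.any (fun k => xs.any (fun x => PySem.Str.isIn k x)) := by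
  rw [Bool.eq_iff_iff]
  simp only [List.any_eq_true]
  constructor
  · rintro ⟨x, hx, k, hk, h⟩; exact ⟨k, hk, x, hx, h⟩
  · rintro ⟨k, hk, x, hx, h⟩; exact ⟨x, hx, k, hk, h⟩

-- ===== VERDICT (by name: the statement is the Claim_ definition above) =====
theorem get_meal_type_spec : Claim_equal_get_meal_type := by
  intro ingredients _
  unfold Spec_get_meal_type get_meal_type get_meal_type_alt
  rw [pv_any_swap ingredients pvNonveg, pv_any_swap ingredients pvVeganExclude]
  simp only [pv_level_char,
    pv_isIn_join "chicken" (by decide) (by decide) ingredients,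
    pv_isIn_join "beef" (by decide) (by decide) ingredients,
    pv_isIn_join "fish" (by decide) (by decide) ingredients,
    pv_isIn_join "mutton" (by decide) (by decide) ingredients,
    pv_isIn_join "shrimp" (by decide) (by decide) ingredients,
    pv_isIn_join "egg" (by decide) (by decide) ingredients,
    pv_isIn_join "lamb" (by decide) (by decide) ingredients,
    pv_isIn_join "pork" (by decide) (by decide) ingredients,
    pv_isIn_join "milk" (by decide) (by decide) ingredients,
    pv_isIn_join "cheese" (by decide) (by decide) ingredients,
    pv_isIn_join "yogurt" (by decide) (by decide) ingredients,
    pv_isIn_join "butter" (by decide) (by decide) ingredients,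
    pv_isIn_join "paneer" (by decide) (by decide) ingredients,
    pv_isIn_join "honey" (by decide) (by decide) ingredients,
    pvNonveg, pvVeganExclude, List.any_cons, List.any_nil, Bool.or_false]
  split_ifs <;> simp_all [PySem.List.pyGet?, PySem.List.pyIdx?] <;> aesop
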